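-- pv_equiv track=rewrite | github.com/rwradek/tabliczka-mnozenia | multiplication-app/engine/group_selector.py | _infer_box_at
-- ===== SOURCE A (Python) =====
-- def _infer_box_at(history, idx):
--     """Roughly infer box number by counting net correct answers up to idx."""
--     box = 0
--     for h in history[: idx + 1]:
--         if h["correct"]:
--             box = min(box + 1, 5)
--         else:
--             box = 1
--     return box
-- ===== SOURCE B (Python) =====
-- def _infer_box_at(history, idx):
--     """Index-based while loop: walk back over the trailing streak of correct
--     answers, then compute the box from the streak length by a capped formula."""
--     sub = history[: idx + 1]
--     n = len(sub)
--     k = n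
--     while k and sub[k - 1]["correct"]:
--         k -= 1
--     return min(n - k if k == 0 else n - k + 1, 5)
-- ===== Notes on version B (the rewrite author's own statement) =====
-- stated objective: alternative
-- what changed: Replaces the forward fold that maintains a saturating counter with an index-based backward while loop that measures the trailing streak of correct answers and turns it into the box number by a capped closed formula.
import Mathlib
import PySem

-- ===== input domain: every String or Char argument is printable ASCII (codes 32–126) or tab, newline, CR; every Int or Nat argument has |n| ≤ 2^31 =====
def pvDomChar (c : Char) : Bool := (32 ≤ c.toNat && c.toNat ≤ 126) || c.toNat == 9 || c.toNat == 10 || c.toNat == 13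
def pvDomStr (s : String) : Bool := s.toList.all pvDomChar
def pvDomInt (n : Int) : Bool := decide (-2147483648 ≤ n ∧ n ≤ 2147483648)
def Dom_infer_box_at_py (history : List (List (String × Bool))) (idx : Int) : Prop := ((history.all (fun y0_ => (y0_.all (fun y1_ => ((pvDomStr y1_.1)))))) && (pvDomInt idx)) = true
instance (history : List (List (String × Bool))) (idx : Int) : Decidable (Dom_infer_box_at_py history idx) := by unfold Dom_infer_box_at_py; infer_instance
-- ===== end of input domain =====

-- B replaces A's forward saturating-counter fold with a backward while loop
-- measuring the trailing streak of correct answers plus a capped formula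
-- (objective: alternative decomposition, same cost).


-- ===== PORT A =====
-- h["correct"]: first-match lookup in the assoc list; exact whenever the key is
-- present (Pre_ below); on a missing key Python raises KeyError, here getD false.
def pvCorrect (h : List (String × Bool)) : Bool := (h.lookup "correct").getD false

-- the body of A's for-loop
def pvStepA (box : Int) (h : List (String × Bool)) : Int :=
  if pvCorrect h then min (box + 1) 5 else 1

def infer_box_at_py (history : List (List (String × Bool))) (idx : Int) : Int :=
  (PySem.List.slice history none (some (idx + 1))).foldl pvStepA 0

-- ===== PORT B =====
-- B-side lookup helper: sub[k-1]["correct"] (key present under Pre_ below)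
def pvHit (h : List (String × Bool)) : Bool := (h.lookup "correct").getD false

-- Source B's while loop: decrement k while k > 0 and sub[k-1]["correct"]; returns
-- the final k (sub[k-1] is always in range, so getD's default is never used).
def pvWhileK (sub : List (List (String × Bool))) : Nat → Nat
  | 0 => 0
  | k + 1 => if pvHit (sub.getD k []) then pvWhileK sub k else k + 1

def infer_box_at_py_alt (history : List (List (String × Bool))) (idx : Int) : Int :=
  let sub := PySem.List.slice history none (some (idx + 1))
  let n := sub.length
  let k := pvWhileK sub n
  min (if k = 0 then (n : Int) - (k : Int) else (n : Int) - (k : Int) + 1) 5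

-- ===== PRECONDITION & SPEC =====
-- Pre_ excludes exactly the inputs where Python's h["correct"] raises KeyError:
-- some entry of history[:idx+1] lacks the key "correct".
def Pre_infer_box_at_py (history : List (List (String × Bool))) (idx : Int) : Prop :=
  ((PySem.List.slice history none (some (idx + 1))).all
    (fun h => (h.lookup "correct").isSome)) = true
instance (history : List (List (String × Bool))) (idx : Int) : Decidable (Pre_infer_box_at_py history idx) := by unfold Pre_infer_box_at_py; infer_instance

def pvWitness_infer_box_at_py : (List (List (String × Bool))) × Int :=
  ([[("correct", true)], [("correct", false)], [("correct", true)]], 2)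

def Spec_infer_box_at_py (history : List (List (String × Bool))) (idx : Int) (out : Int) : Prop := out = infer_box_at_py_alt history idx
instance (history : List (List (String × Bool))) (idx : Int) (out : Int) : Decidable (Spec_infer_box_at_py history idx out) := by unfold Spec_infer_box_at_py; infer_instance

-- ===== CLAIM (what is proved, stated in full; the proofs are below) =====
def Claim_equal_infer_box_at_py : Prop := ∀ (history : List (List (String × Bool))) (idx : Int), Dom_infer_box_at_py history idx → Pre_infer_box_at_py history idx → Spec_infer_box_at_py history idx (infer_box_at_py history idx)

-- ===== LEMMAS AND PROOFS =====

-- A's accumulator stays in [0, 5].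
theorem pvFoldA_bounds (s : List (List (String × Bool))) (box : Int)
    (h : 0 ≤ box ∧ box ≤ 5) : 0 ≤ s.foldl pvStepA box ∧ s.foldl pvStepA box ≤ 5 := by
  induction s generalizing box with
  | nil => simpa using h
  | cons x t ih =>
      simp only [List.foldl_cons]
      apply ih
      unfold pvStepA
      split <;> omega

theorem pvWhileK_le (sub : List (List (String × Bool))) (k : Nat) : pvWhileK sub k ≤ k := by
  induction k with
  | zero => simp [pvWhileK]
  | succ k ih =>
      simp only [pvWhileK]
      split
      · omega
      · exact le_rfl

-- appending past the scanned range does not change the loop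
theorem pvWhileK_append (t : List (List (String × Bool))) (x : List (String × Bool))
    (k : Nat) (hk : k ≤ t.length) : pvWhileK (t ++ [x]) k = pvWhileK t k := by
  induction k with
  | zero => rfl
  | succ k ih =>
      have hg : (t ++ [x]).getD k [] = t.getD k [] := by
        simp [List.getD_eq_getElem?_getD, List.getElem?_append_left (by omega : k < t.length)]
      simp only [pvWhileK, hg, ih (by omega)]

-- A's fold equals B's streak formula on every list
theorem pvFold_eq_streak (s : List (List (String × Bool))) :
    s.foldl pvStepA 0 =
      min (if pvWhileK s s.length = 0 then (s.length : Int) - (pvWhileK s s.length : Int)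
           else (s.length : Int) - (pvWhileK s s.length : Int) + 1) 5 := by
  induction s using List.reverseRecOn with
  | nil => simp [pvWhileK]
  | append_singleton t x ih =>
      have hlen : (t ++ [x]).length = t.length + 1 := by simp
      have hgx : (t ++ [x]).getD t.length [] = x := by
        simp [List.getD_eq_getElem?_getD]
      rw [List.foldl_append, List.foldl_cons, List.foldl_nil, hlen]
      simp only [pvWhileK, hgx]
      by_cases hc : pvHit x
      · rw [if_pos hc, pvWhileK_append t x t.length le_rfl]
        have hk := pvWhileK_le t t.length
        have hb := pvFoldA_bounds t 0 (by omega)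
        have hcc : pvCorrect x = true := hc
        simp only [pvStepA, hcc, if_pos]
        rw [ih]
        by_cases h0 : pvWhileK t t.length = 0
        · simp only [h0, if_pos]
          push_cast
          omega
        · simp only [h0, ite_false]
          push_cast [h0]
          omega
      · rw [if_neg hc]
        have hcc : pvCorrect x = false := by simpa [pvCorrect, pvHit] using hc
        simp only [pvStepA, hcc, Bool.false_eq_true, ite_false]
        simp

-- ===== VERDICT (by name: the statement is the Claim_ definition above) =====
theorem infer_box_at_py_spec : Claim_equal_infer_box_at_py := by
  intro history idx _ _
  unfold Spec_infer_box_at_py infer_box_at_py infer_box_at_py_alt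
  exact pvFold_eq_streak _
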